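-- pv_equiv track=rewrite | github.com/AdriaFerOrtiz/ProyectoMechanicalTurk | src/robot/motor_control.py | generar_camino_simple
-- ===== SOURCE A (Python) =====
-- def generar_camino_simple(origen, destino):
--     """
--     Devuelve una lista de coordenadas que forman un camino simple
--     de origen a destino en movimientos rectilíneos (primero vertical, luego horizontal).
--     """
--     camino = [origen]
--     fila_origen, col_origen = origen
--     fila_destino, col_destino = destino
--
--     # Movimiento vertical
--     paso_f = 1 if fila_destino > fila_origen else -1
--     for f in range(fila_origen + paso_f, fila_destino + paso_f, paso_f):
--         camino.append((f, col_origen))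
--
--     # Movimiento horizontal
--     paso_c = 1 if col_destino > col_origen else -1
--     for c in range(col_origen + paso_c, col_destino + paso_c, paso_c):
--         camino.append((fila_destino, c))
--
--     return camino
-- ===== SOURCE B (Python) =====
-- def generar_camino_simple(origen, destino):
--     """
--     Camino simple de origen a destino (primero vertical, luego horizontal),
--     calculado en forma cerrada: el punto k-esimo del camino se obtiene por
--     aritmetica de indices sobre un unico range, sin recorrer las coordenadas.
--     """
--     fo, co = origen
--     fd, cd = destino
--     df = abs(fd - fo)
--     dc = abs(cd - co)
--     sf = 1 if fd >= fo else -1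
--     sc = 1 if cd >= co else -1
--     return [(fo + sf * k, co) if k <= df else (fd, co + sc * (k - df))
--             for k in range(df + dc + 1)]
-- ===== Notes on version B (the rewrite author's own statement) =====
-- stated objective: alternative
-- what changed: B computes the path in closed form: one comprehension over a single index range 0..|df|+|dc| where the k-th point is obtained by index arithmetic (fo+sf*k or fd, co+sc*(k-|df|)), replacing A's two sequential range() sweeps over the actual coordinates.
import Mathlib
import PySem

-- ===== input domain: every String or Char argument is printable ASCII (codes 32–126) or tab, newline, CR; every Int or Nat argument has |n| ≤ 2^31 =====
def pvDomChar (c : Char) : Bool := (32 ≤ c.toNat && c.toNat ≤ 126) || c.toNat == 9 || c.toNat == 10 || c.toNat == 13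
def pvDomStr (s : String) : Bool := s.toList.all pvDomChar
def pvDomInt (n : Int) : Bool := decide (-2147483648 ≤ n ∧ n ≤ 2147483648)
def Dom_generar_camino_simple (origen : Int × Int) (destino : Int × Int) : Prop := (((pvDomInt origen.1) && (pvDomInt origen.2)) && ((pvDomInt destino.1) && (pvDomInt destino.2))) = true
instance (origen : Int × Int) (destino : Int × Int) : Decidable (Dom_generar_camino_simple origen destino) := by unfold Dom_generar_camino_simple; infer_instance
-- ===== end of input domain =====

-- B computes the k-th point of the L-path in closed form by index arithmetic over a
-- single range, instead of A's two sequential range() sweeps (objective: alternative).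

-- ===== PORT A =====
-- A: camino = [origen]; vertical leg appends (f, col_origen) for f in
-- range(fila_origen+paso_f, fila_destino+paso_f, paso_f); then horizontal leg.
def generar_camino_simple (origen : Int × Int) (destino : Int × Int) : List (Int × Int) :=
  let fila_origen := origen.1
  let col_origen := origen.2
  let fila_destino := destino.1
  let col_destino := destino.2
  let paso_f : Int := if fila_destino > fila_origen then 1 else -1
  let camino := [origen] ++
    (PySem.List.pyRange (fila_origen + paso_f) (fila_destino + paso_f) paso_f).map
      (fun f => (f, col_origen))
  let paso_c : Int := if col_destino > col_origen then 1 else -1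
  camino ++
    (PySem.List.pyRange (col_origen + paso_c) (col_destino + paso_c) paso_c).map
      (fun c => (fila_destino, c))

-- ===== PORT B =====
-- B: one comprehension over range(df+dc+1); point k is (fo+sf*k, co) while k ≤ df,
-- and (fd, co+sc*(k-df)) afterwards.
def generar_camino_simple_alt (origen : Int × Int) (destino : Int × Int) : List (Int × Int) :=
  let fo := origen.1
  let co := origen.2
  let fd := destino.1
  let cd := destino.2
  let df : Int := |fd - fo|
  let dc : Int := |cd - co|
  let sf : Int := if fd ≥ fo then 1 else -1
  let sc : Int := if cd ≥ co then 1 else -1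
  (PySem.List.pyRange 0 (df + dc + 1) 1).map
    (fun k => if k ≤ df then (fo + sf * k, co) else (fd, co + sc * (k - df)))

-- ===== PRECONDITION & SPEC =====
def Spec_generar_camino_simple (origen : Int × Int) (destino : Int × Int) (out : List (Int × Int)) : Prop := out = generar_camino_simple_alt origen destino
instance (origen : Int × Int) (destino : Int × Int) (out : List (Int × Int)) : Decidable (Spec_generar_camino_simple origen destino out) := by unfold Spec_generar_camino_simple; infer_instance

-- ===== CLAIM (what is proved, stated in full; the proofs are below) =====
def Claim_equal_generar_camino_simple : Prop := ∀ (origen : Int × Int) (destino : Int × Int), Dom_generar_camino_simple origen destino → Spec_generar_camino_simple origen destino (generar_camino_simple origen destino)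

-- ===== LEMMAS AND PROOFS =====

theorem pv_main (fo co fd cd : Int) :
    generar_camino_simple (fo, co) (fd, cd) = generar_camino_simple_alt (fo, co) (fd, cd) := by
  simp only [generar_camino_simple, generar_camino_simple_alt]
  rw [PySem.List.pyRange_one 0 (|fd - fo| + |cd - co| + 1)]
  have habs1 : |fd - fo| = ((fd - fo).natAbs : Int) := Int.abs_eq_natAbs _
  have habs2 : |cd - co| = ((cd - co).natAbs : Int) := Int.abs_eq_natAbs _
  rw [habs1, habs2]
  set m := (fd - fo).natAbs with hm
  set n := (cd - co).natAbs with hn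
  have h1 : (((m : Int)) + n + 1 - 0).toNat = (m + 1) + n := by omega
  rw [h1, List.range_add, List.map_append, List.map_map, List.range_succ_eq_map,
      List.map_cons, List.map_map]
  -- vertical leg of A as a range map
  by_cases hv : fd > fo
  · rw [if_pos hv, PySem.List.pyRange_one]
    have h2 : (fd + 1 - (fo + 1)).toNat = m := by omega
    rw [h2, List.map_map]
    by_cases hh : cd > co
    · rw [if_pos hh, PySem.List.pyRange_one]
      have h3 : (cd + 1 - (co + 1)).toNat = n := by omega
      rw [h3, List.map_map]
      simp only [List.cons_append, List.nil_append]
      congr 1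
      · simp only [CharP.cast_eq_zero]
        rw [if_pos (by omega : ((0:Int) + 0) ≤ (m : Int))]
        simp
      rw [List.map_append, List.map_map, List.map_map]
      congr 1
      · apply List.map_congr_left
        intro k hk
        have hkm : k < m := List.mem_range.mp hk
        simp only [Function.comp]
        rw [if_pos (by push_cast; omega : ((0:Int) + (k.succ : Int)) ≤ (m : Int)),
            if_pos (by omega : fd ≥ fo)]
        simp only [Prod.mk.injEq]
        constructor <;> push_cast <;> omega
      · apply List.map_congr_left
        intro k hk
        have hkn : k < n := List.mem_range.mp hk
        simp only [Function.comp]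
        rw [if_neg (by push_cast; omega : ¬ ((0:Int) + ((m + 1 + k : Nat) : Int)) ≤ (m : Int)),
            if_pos (by omega : cd ≥ co)]
        simp only [Prod.mk.injEq]
        constructor <;> push_cast <;> omega
    · rw [if_neg hh, PySem.List.pyRange_neg_one]
      have h3 : (co + -1 - (cd + -1)).toNat = n := by omega
      rw [h3, List.map_map]
      simp only [List.cons_append, List.nil_append]
      congr 1
      · simp only [CharP.cast_eq_zero]
        rw [if_pos (by omega : ((0:Int) + 0) ≤ (m : Int))]
        simp
      rw [List.map_append, List.map_map, List.map_map]
      congr 1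
      · apply List.map_congr_left
        intro k hk
        have hkm : k < m := List.mem_range.mp hk
        simp only [Function.comp]
        rw [if_pos (by push_cast; omega : ((0:Int) + (k.succ : Int)) ≤ (m : Int)),
            if_pos (by omega : fd ≥ fo)]
        simp only [Prod.mk.injEq]
        constructor <;> push_cast <;> omega
      · apply List.map_congr_left
        intro k hk
        have hkn : k < n := List.mem_range.mp hk
        have hlt : cd < co := by omega
        simp only [Function.comp]
        rw [if_neg (by push_cast; omega : ¬ ((0:Int) + ((m + 1 + k : Nat) : Int)) ≤ (m : Int)),
            if_neg (by omega : ¬ cd ≥ co)]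
        simp only [Prod.mk.injEq]
        constructor <;> push_cast <;> omega
  · rw [if_neg hv, PySem.List.pyRange_neg_one]
    have h2 : (fo + -1 - (fd + -1)).toNat = m := by omega
    rw [h2, List.map_map]
    by_cases hh : cd > co
    · rw [if_pos hh, PySem.List.pyRange_one]
      have h3 : (cd + 1 - (co + 1)).toNat = n := by omega
      rw [h3, List.map_map]
      simp only [List.cons_append, List.nil_append]
      congr 1
      · simp only [CharP.cast_eq_zero]
        rw [if_pos (by omega : ((0:Int) + 0) ≤ (m : Int))]
        simp
      rw [List.map_append, List.map_map, List.map_map]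
      congr 1
      · apply List.map_congr_left
        intro k hk
        have hkm : k < m := List.mem_range.mp hk
        have hlt : fd < fo := by omega
        simp only [Function.comp]
        rw [if_pos (by push_cast; omega : ((0:Int) + (k.succ : Int)) ≤ (m : Int)),
            if_neg (by omega : ¬ fd ≥ fo)]
        simp only [Prod.mk.injEq]
        constructor <;> push_cast <;> omega
      · apply List.map_congr_left
        intro k hk
        have hkn : k < n := List.mem_range.mp hk
        simp only [Function.comp]
        rw [if_neg (by push_cast; omega : ¬ ((0:Int) + ((m + 1 + k : Nat) : Int)) ≤ (m : Int)),
            if_pos (by omega : cd ≥ co)]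
        simp only [Prod.mk.injEq]
        constructor <;> push_cast <;> omega
    · rw [if_neg hh, PySem.List.pyRange_neg_one]
      have h3 : (co + -1 - (cd + -1)).toNat = n := by omega
      rw [h3, List.map_map]
      simp only [List.cons_append, List.nil_append]
      congr 1
      · simp only [CharP.cast_eq_zero]
        rw [if_pos (by omega : ((0:Int) + 0) ≤ (m : Int))]
        simp
      rw [List.map_append, List.map_map, List.map_map]
      congr 1
      · apply List.map_congr_left
        intro k hk
        have hkm : k < m := List.mem_range.mp hk
        have hlt : fd < fo := by omega
        simp only [Function.comp]
        rw [if_pos (by push_cast; omega : ((0:Int) + (k.succ : Int)) ≤ (m : Int)),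
            if_neg (by omega : ¬ fd ≥ fo)]
        simp only [Prod.mk.injEq]
        constructor <;> push_cast <;> omega
      · apply List.map_congr_left
        intro k hk
        have hkn : k < n := List.mem_range.mp hk
        have hlt : cd < co := by omega
        simp only [Function.comp]
        rw [if_neg (by push_cast; omega : ¬ ((0:Int) + ((m + 1 + k : Nat) : Int)) ≤ (m : Int)),
            if_neg (by omega : ¬ cd ≥ co)]
        simp only [Prod.mk.injEq]
        constructor <;> push_cast <;> omega

-- ===== VERDICT (by name: the statement is the Claim_ definition above) =====
theorem generar_camino_simple_spec : Claim_equal_generar_camino_simple := by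
  intro origen destino _
  show _ = _
  obtain ⟨fo, co⟩ := origen
  obtain ⟨fd, cd⟩ := destino
  exact pv_main fo co fd cd
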